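-- pv_equiv track=rewrite | github.com/shawkridge/athena | src/athena/rag/answer_generator.py | _is_segment_supported
-- ===== SOURCE A (Python) =====
-- from typing import Any, Dict, List, Optional
--
-- def _is_segment_supported(segment: str, documents: List[str]) -> bool:
--     """Check if a segment is supported by documents
--
--     Args:
--         segment: The text segment
--         documents: List of documents
--
--     Returns:
--         True if segment is supported
--     """
--     # Simple keyword matching
--     segment_words = set(segment.lower().split())
--     min_overlap = max(1, len(segment_words) // 3)  # At least 1/3 of words
--
--     for doc in documents:
--         doc_words = set(doc.lower().split())
--         overlap = len(segment_words & doc_words)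
--         if overlap >= min_overlap:
--             return True
--
--     return False
-- ===== SOURCE B (Python) =====
-- def _is_segment_supported(segment, documents):
--     """Transposed traversal: instead of looping over documents and
--     intersecting each document's word set with the segment's, loop over
--     the SEGMENT words once, incrementing a per-document match counter for
--     every document whose word set contains that word; then check whether
--     any counter reaches the threshold."""
--     segment_words = set(segment.lower().split())
--     min_overlap = max(1, len(segment_words) // 3)
--     doc_sets = [set(d.lower().split()) for d in documents]
--     counts = [0] * len(doc_sets)
--     for w in segment_words:
--         for i, ds in enumerate(doc_sets):
--             if w in ds:
--                 counts[i] += 1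
--     return any(c >= min_overlap for c in counts)
-- ===== Notes on version B (the rewrite author's own statement) =====
-- stated objective: alternative
-- what changed: B transposes the traversal: the outer loop runs over the segment's distinct words and increments a per-document counter array for each document containing the word, then a final any() pass checks the threshold, instead of A's per-document set intersection with early return.
import Mathlib
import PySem

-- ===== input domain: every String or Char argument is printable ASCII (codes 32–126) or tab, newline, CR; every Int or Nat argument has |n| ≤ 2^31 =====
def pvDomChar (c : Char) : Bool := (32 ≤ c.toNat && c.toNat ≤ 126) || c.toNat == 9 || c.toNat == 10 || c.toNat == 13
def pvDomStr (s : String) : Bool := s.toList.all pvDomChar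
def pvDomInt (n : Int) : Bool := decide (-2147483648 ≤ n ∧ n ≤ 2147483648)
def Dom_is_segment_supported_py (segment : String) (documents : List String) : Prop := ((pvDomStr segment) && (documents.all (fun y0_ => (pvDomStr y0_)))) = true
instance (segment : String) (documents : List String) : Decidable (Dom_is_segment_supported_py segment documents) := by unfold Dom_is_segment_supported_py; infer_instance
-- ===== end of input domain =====

-- B transposes the traversal: outer loop over the segment's distinct words, incrementing a
-- per-document match counter array, then a final any() pass — instead of A's per-document
-- set intersection with early return (objective: alternative).


-- ===== PORT A =====
-- A's 'for doc in documents' loop: full word set of each doc, intersection size test, early return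
def aDocLoop (segWords : PySem.Set String) (minOverlap : Nat) : List String → Bool
  | [] => false
  | doc :: rest =>
      let docWords : PySem.Set String := PySem.Set.ofList (PySem.Str.split₀ (PySem.Str.lower doc))
      let overlap := (PySem.Set.inter segWords docWords).length
      if minOverlap ≤ overlap then true else aDocLoop segWords minOverlap rest

def is_segment_supported_py (segment : String) (documents : List String) : Bool :=
  let segWords : PySem.Set String := PySem.Set.ofList (PySem.Str.split₀ (PySem.Str.lower segment))
  let minOverlap := max 1 (segWords.length / 3)
  aDocLoop segWords minOverlap documents

-- ===== PORT B =====
-- B's outer loop 'for w in segment_words': bump the counter of every document containing w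
-- (the counter array does not depend on the set's iteration order: each entry is a sum of
-- per-word indicators)
def is_segment_supported_py_alt (segment : String) (documents : List String) : Bool :=
  let segWords : PySem.Set String := PySem.Set.ofList (PySem.Str.split₀ (PySem.Str.lower segment))
  let minOverlap := max 1 (segWords.length / 3)
  let docSets : List (PySem.Set String) :=
    documents.map (fun d => PySem.Set.ofList (PySem.Str.split₀ (PySem.Str.lower d)))
  let counts : List Nat :=
    segWords.foldl
      (fun cs w => List.zipWith (fun c ds => if PySem.Set.contains ds w then c + 1 else c) cs docSets)
      (List.replicate docSets.length 0)
  counts.any (fun c => minOverlap ≤ c)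

-- ===== PRECONDITION & SPEC =====
def Spec_is_segment_supported_py (segment : String) (documents : List String) (out : Bool) : Prop := out = is_segment_supported_py_alt segment documents
instance (segment : String) (documents : List String) (out : Bool) : Decidable (Spec_is_segment_supported_py segment documents out) := by unfold Spec_is_segment_supported_py; infer_instance

-- ===== CLAIM (what is proved, stated in full; the proofs are below) =====
def Claim_equal_is_segment_supported_py : Prop := ∀ (segment : String) (documents : List String), Dom_is_segment_supported_py segment documents → Spec_is_segment_supported_py segment documents (is_segment_supported_py segment documents)

-- ===== LEMMAS AND PROOFS =====

-- B's double loop with a cons-shaped counter/doc-set pair splits into the head document's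
-- single-counter fold and the same double loop on the tail
theorem bFold_cons (ws : List String) (c : Nat) (cs : List Nat)
    (ds : PySem.Set String) (dss : List (PySem.Set String)) :
    ws.foldl
        (fun cs w => List.zipWith (fun c ds => if PySem.Set.contains ds w then c + 1 else c) cs (ds :: dss))
        (c :: cs)
      = (ws.foldl (fun c w => if PySem.Set.contains ds w then c + 1 else c) c)
        :: ws.foldl
            (fun cs w => List.zipWith (fun c ds => if PySem.Set.contains ds w then c + 1 else c) cs dss)
            cs := by
  induction ws generalizing c cs with
  | nil => rfl
  | cons w ws ih => simp only [List.foldl, List.zipWith]; exact ih _ _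

-- a single counter folded over the words counts the words the document contains
theorem bFold_single (ds : PySem.Set String) (ws : List String) (c : Nat) :
    ws.foldl (fun c w => if PySem.Set.contains ds w then c + 1 else c) c
      = c + (ws.filter (fun w => PySem.Set.contains ds w)).length := by
  induction ws generalizing c with
  | nil => simp
  | cons w ws ih =>
      simp only [List.foldl]
      by_cases h : PySem.Set.contains ds w = true
      · rw [if_pos h, ih, List.filter_cons, if_pos h]; simp; omega
      · rw [if_neg h, ih, List.filter_cons, if_neg h]

-- the final counter array is exactly the list of intersection sizes, document by document
theorem bFold_eq_map (segWords : PySem.Set String) (dss : List (PySem.Set String)) :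
    segWords.foldl
        (fun cs w => List.zipWith (fun c ds => if PySem.Set.contains ds w then c + 1 else c) cs dss)
        (List.replicate dss.length 0)
      = dss.map (fun ds => (segWords.filter (fun w => PySem.Set.contains ds w)).length) := by
  induction dss with
  | nil =>
      simp only [List.length_nil, List.replicate, List.map_nil]
      induction segWords with
      | nil => rfl
      | cons w ws ih => simpa [List.foldl, List.zipWith] using ih
  | cons ds dss ih =>
      simp only [List.length_cons, List.replicate, List.map_cons]
      rw [bFold_cons, ih, bFold_single]; simp

-- A's early-return loop is an 'any' over the documents
theorem aDocLoop_eq_any (segWords : PySem.Set String) (minOverlap : Nat) (docs : List String) :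
    aDocLoop segWords minOverlap docs
      = docs.any (fun doc =>
          minOverlap ≤ (PySem.Set.inter segWords (PySem.Set.ofList (PySem.Str.split₀ (PySem.Str.lower doc)))).length) := by
  induction docs with
  | nil => rfl
  | cons doc rest ih =>
      simp only [aDocLoop, List.any_cons]
      by_cases h : minOverlap ≤ (PySem.Set.inter segWords (PySem.Set.ofList (PySem.Str.split₀ (PySem.Str.lower doc)))).length
      · simp [h]
      · simp [h, ih]

-- ===== VERDICT (by name: the statement is the Claim_ definition above) =====
theorem is_segment_supported_py_spec : Claim_equal_is_segment_supported_py := by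
  intro segment documents _
  unfold Spec_is_segment_supported_py is_segment_supported_py is_segment_supported_py_alt
  simp only [bFold_eq_map, List.any_map, aDocLoop_eq_any]
  rfl
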